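-- pv_equiv track=rewrite | github.com/dalaldia5/Adobe-1A-Final | main.py | fix_hierarchy
-- ===== SOURCE A (Python) =====
-- from typing import List, Dict, Tuple, Optional
--
-- def fix_hierarchy(outline: List[Dict]) -> List[Dict]:
--     """Ensure proper hierarchical structure (H1 -> H2 -> H3)."""
--     if not outline:
--         return outline
--
--     fixed_outline = []
--     level_counts = {"H1": 0, "H2": 0, "H3": 0}
--
--     for item in outline:
--         level = item["level"]
--
--         # If we see H2 without H1, or H3 without H1/H2, adjust
--         if level == "H2" and level_counts["H1"] == 0:
--             item["level"] = "H1"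
--             level = "H1"
--         elif level == "H3" and level_counts["H1"] == 0:
--             item["level"] = "H1"
--             level = "H1"
--         elif level == "H3" and level_counts["H2"] == 0:
--             item["level"] = "H2"
--             level = "H2"
--
--         level_counts[level] += 1
--         fixed_outline.append(item)
--
--     return fixed_outline
-- ===== SOURCE B (Python) =====
-- def fix_hierarchy(outline):
--     """Ensure proper hierarchical structure (H1 -> H2 -> H3)."""
--     if not outline:
--         return outline
--
--     num = {"H1": 1, "H2": 2, "H3": 3}
--     established = 0  # deepest heading level established so far
--     for item in outline:
--         new_level = min(num[item["level"]], established + 1)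
--         established = max(established, new_level)
--         item["level"] = "H" + str(new_level)
--     return outline
-- ===== Notes on version B (the rewrite author's own statement) =====
-- stated objective: simpler
-- what changed: Replaced the three-counter dict and the cascade of promotion branches with a single integer 'established' (deepest valid level so far) and the arithmetic clamp new_level = min(level_number, established + 1).
import Mathlib
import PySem

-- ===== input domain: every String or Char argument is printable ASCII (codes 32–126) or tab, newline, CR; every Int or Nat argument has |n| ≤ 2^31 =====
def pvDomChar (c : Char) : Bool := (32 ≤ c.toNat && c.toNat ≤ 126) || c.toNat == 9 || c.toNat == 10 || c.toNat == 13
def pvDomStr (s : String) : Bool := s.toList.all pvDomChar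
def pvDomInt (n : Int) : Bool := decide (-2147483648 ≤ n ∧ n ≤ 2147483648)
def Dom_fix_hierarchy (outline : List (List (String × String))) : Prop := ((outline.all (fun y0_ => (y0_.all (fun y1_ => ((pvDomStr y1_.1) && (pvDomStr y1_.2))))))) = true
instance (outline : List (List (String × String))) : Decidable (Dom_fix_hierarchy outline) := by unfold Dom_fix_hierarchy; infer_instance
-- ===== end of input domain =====

-- B replaces A's three-counter dict and promotion branch cascade by one integer 'established' and the clamp
-- new_level = min(level_number, established + 1); both mutate the items in place, the theorems are about the returned value.
-- ===== PORT A =====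
def fixA_step (st : List (List (String × String)) × PySem.Dict String Int)
    (item : List (String × String)) : List (List (String × String)) × PySem.Dict String Int :=
  let counts := st.2
  let level := (PySem.Dict.mk item).getD "level" ""
  let p :=
    if level == "H2" && (counts.getD "H1" 0 == 0) then
      ((PySem.Dict.insert ⟨item⟩ "level" "H1").items, "H1")
    else if level == "H3" && (counts.getD "H1" 0 == 0) then
      ((PySem.Dict.insert ⟨item⟩ "level" "H1").items, "H1")
    else if level == "H3" && (counts.getD "H2" 0 == 0) then
      ((PySem.Dict.insert ⟨item⟩ "level" "H2").items, "H2")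
    else (item, level)
  let counts2 := counts.insert p.2 (counts.getD p.2 0 + 1)
  (st.1 ++ [p.1], counts2)


def fix_hierarchy (outline : List (List (String × String))) : List (List (String × String)) :=
  if outline = [] then outline
  else (outline.foldl fixA_step ([], PySem.Dict.ofList [("H1", 0), ("H2", 0), ("H3", 0)])).1

-- ===== PORT B =====
def fixB_go (established : Int) : List (List (String × String)) → List (List (String × String))
  | [] => []
  | item :: rest =>
    let new_level :=
      min ((PySem.Dict.ofList [("H1", (1 : Int)), ("H2", 2), ("H3", 3)]).getD
            ((PySem.Dict.mk item).getD "level" "") 0)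
          (established + 1)
    (PySem.Dict.insert ⟨item⟩ "level" ("H" ++ PySem.Int.toStr new_level)).items
      :: fixB_go (max established new_level) rest


def fix_hierarchy_alt (outline : List (List (String × String))) : List (List (String × String)) :=
  if outline = [] then outline else fixB_go 0 outline

-- ===== PRECONDITION & SPEC =====
-- Pre_ excludes items whose "level" key is missing or not "H1"/"H2"/"H3" (both programs raise KeyError there),
-- and association lists with duplicate keys, which do not represent any Python dict.
def Pre_fix_hierarchy (outline : List (List (String × String))) : Prop :=
  ∀ item ∈ outline, (item.map Prod.fst).Nodup ∧
    ((PySem.Dict.mk item).get? "level" = some "H1" ∨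
     (PySem.Dict.mk item).get? "level" = some "H2" ∨
     (PySem.Dict.mk item).get? "level" = some "H3")
instance (outline : List (List (String × String))) : Decidable (Pre_fix_hierarchy outline) := by
  unfold Pre_fix_hierarchy; infer_instance
def pvWitness_fix_hierarchy : (List (List (String × String))) :=
  [[("level", "H2"), ("text", "Intro")], [("level", "H3")], [("level", "H1")]]

def Spec_fix_hierarchy (outline : List (List (String × String))) (out : List (List (String × String))) : Prop := out = fix_hierarchy_alt outline
instance (outline : List (List (String × String))) (out : List (List (String × String))) : Decidable (Spec_fix_hierarchy outline out) := by unfold Spec_fix_hierarchy; infer_instance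

-- ===== CLAIM (what is proved, stated in full; the proofs are below) =====
def Claim_equal_fix_hierarchy : Prop := ∀ (outline : List (List (String × String))), Dom_fix_hierarchy outline → Pre_fix_hierarchy outline → Spec_fix_hierarchy outline (fix_hierarchy outline)

-- ===== LEMMAS AND PROOFS =====
-- Re-inserting the value a key already maps to leaves the association list unchanged.
theorem insert_self_items (item : List (String × String)) (k v : String)
    (hnd : (item.map Prod.fst).Nodup) (h : (PySem.Dict.mk item).get? k = some v) :
    (PySem.Dict.insert ⟨item⟩ k v).items = item := by
  have hc : (PySem.Dict.mk item).contains k = true := by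
    rw [PySem.Dict.contains_eq_isSome_get?, h]; rfl
  rw [PySem.Dict.items_insert_of_contains _ v hc]
  have hkeys : (PySem.Dict.mk item).keys.Nodup := by simpa [PySem.Dict.keys] using hnd
  have hcong : ∀ p ∈ item, (if (p.1 == k) = true then (k, v) else p) = p := by
    intro p hp
    by_cases hk : p.1 = k
    · have hm : (k, p.2) ∈ (PySem.Dict.mk item).items := by
        simpa [PySem.Dict.items, ← hk] using hp
      have hg := PySem.Dict.get?_of_mem_items _ hm hkeys
      rw [h] at hg
      obtain rfl : v = p.2 := Option.some.inj hg
      simp [← hk]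
    · simp [hk]
  calc (List.map (fun p => if (p.1 == k) = true then (k, v) else p) (PySem.Dict.mk item).items)
      = List.map id item := List.map_congr_left hcong
    _ = item := List.map_id item

theorem go_eq (l : List (List (String × String))) :
    ∀ (acc : List (List (String × String))) (counts : PySem.Dict String Int) (est : Int),
    (∀ item ∈ l, (item.map Prod.fst).Nodup ∧
      ((PySem.Dict.mk item).get? "level" = some "H1" ∨
       (PySem.Dict.mk item).get? "level" = some "H2" ∨
       (PySem.Dict.mk item).get? "level" = some "H3")) →
    (counts.getD "H1" 0 = 0 ↔ est < 1) → 0 ≤ counts.getD "H1" 0 →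
    (counts.getD "H2" 0 = 0 ↔ est < 2) → 0 ≤ counts.getD "H2" 0 →
    0 ≤ est →
    (l.foldl fixA_step (acc, counts)).1 = acc ++ fixB_go est l := by
  induction l with
  | nil => intro acc counts est _ _ _ _ _ _; simp [fixB_go]
  | cons item rest ih =>
    intro acc counts est hpre h1 h1n h2 h2n hest
    obtain ⟨hnd, hv⟩ := hpre item (List.mem_cons_self ..)
    have hrest := fun it h => hpre it (List.mem_cons_of_mem _ h)
    rcases hv with hv | hv | hv
    all_goals have hg := PySem.Dict.getD_of_get?_eq_some _ "" hv
    all_goals have hself := insert_self_items item "level" _ hnd hv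
    all_goals simp only [List.foldl_cons]
    · -- v = "H1"
      have hstep : fixA_step (acc, counts) item
          = (acc ++ [item], counts.insert "H1" (counts.getD "H1" 0 + 1)) := by
        simp [fixA_step, hg]
      have hmin : min ((PySem.Dict.ofList [("H1", (1 : Int)), ("H2", 2), ("H3", 3)]).getD
          ((PySem.Dict.mk item).getD "level" "") 0) (est + 1) = 1 := by
        rw [hg, show (PySem.Dict.ofList [("H1", (1 : Int)), ("H2", 2), ("H3", 3)]).getD "H1" 0 = 1 from by decide]
        omega
      have hB : fixB_go est (item :: rest) = item :: fixB_go (max est 1) rest := by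
        simp only [fixB_go, hmin]
        rw [show ("H" ++ PySem.Int.toStr (1 : Int)) = "H1" from by decide, hself]
      rw [hstep, hB, ih _ _ (max est 1) hrest ?_ ?_ ?_ ?_ ?_]
      · simp
      · simp; omega
      · simp; omega
      · simp [PySem.Dict.getD_insert]; omega
      · simp [PySem.Dict.getD_insert]; omega
      · omega
    · -- v = "H2"
      by_cases ha : counts.getD "H1" 0 = 0
      · have hest0 : est = 0 := by have := h1.mp ha; omega
        subst hest0
        have hstep : fixA_step (acc, counts) item
            = (acc ++ [(PySem.Dict.insert ⟨item⟩ "level" "H1").items],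
               counts.insert "H1" (counts.getD "H1" 0 + 1)) := by
          simp [fixA_step, hg, ha]
        have hmin : min ((PySem.Dict.ofList [("H1", (1 : Int)), ("H2", 2), ("H3", 3)]).getD
            ((PySem.Dict.mk item).getD "level" "") 0) ((0 : Int) + 1) = 1 := by
          rw [hg, show (PySem.Dict.ofList [("H1", (1 : Int)), ("H2", 2), ("H3", 3)]).getD "H2" 0 = 2 from by decide]; omega
        have hB : fixB_go 0 (item :: rest)
            = (PySem.Dict.insert ⟨item⟩ "level" "H1").items :: fixB_go (max 0 1) rest := by
          simp only [fixB_go, hmin]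
          rw [show ("H" ++ PySem.Int.toStr (1 : Int)) = "H1" from by decide]
        rw [hstep, hB, ih _ _ (max 0 1) hrest ?_ ?_ ?_ ?_ ?_]
        · simp
        · simp; omega
        · simp; omega
        · simp [PySem.Dict.getD_insert]; omega
        · simp [PySem.Dict.getD_insert]; omega
        · omega
      · have hstep : fixA_step (acc, counts) item
            = (acc ++ [item], counts.insert "H2" (counts.getD "H2" 0 + 1)) := by
          simp [fixA_step, hg, ha]
        have hmin : min ((PySem.Dict.ofList [("H1", (1 : Int)), ("H2", 2), ("H3", 3)]).getD
            ((PySem.Dict.mk item).getD "level" "") 0) (est + 1) = 2 := by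
          rw [hg, show (PySem.Dict.ofList [("H1", (1 : Int)), ("H2", 2), ("H3", 3)]).getD "H2" 0 = 2 from by decide]
          omega
        have hB : fixB_go est (item :: rest) = item :: fixB_go (max est 2) rest := by
          simp only [fixB_go, hmin]
          rw [show ("H" ++ PySem.Int.toStr (2 : Int)) = "H2" from by decide, hself]
        rw [hstep, hB, ih _ _ (max est 2) hrest ?_ ?_ ?_ ?_ ?_]
        · simp
        · simp [PySem.Dict.getD_insert]; omega
        · simp [PySem.Dict.getD_insert]; omega
        · simp; omega
        · simp; omega
        · omega
    · -- v = "H3"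
      by_cases ha : counts.getD "H1" 0 = 0
      · have hest0 : est = 0 := by have := h1.mp ha; omega
        subst hest0
        have hstep : fixA_step (acc, counts) item
            = (acc ++ [(PySem.Dict.insert ⟨item⟩ "level" "H1").items],
               counts.insert "H1" (counts.getD "H1" 0 + 1)) := by
          simp [fixA_step, hg, ha]
        have hmin : min ((PySem.Dict.ofList [("H1", (1 : Int)), ("H2", 2), ("H3", 3)]).getD
            ((PySem.Dict.mk item).getD "level" "") 0) ((0 : Int) + 1) = 1 := by
          rw [hg, show (PySem.Dict.ofList [("H1", (1 : Int)), ("H2", 2), ("H3", 3)]).getD "H3" 0 = 3 from by decide]; omega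
        have hB : fixB_go 0 (item :: rest)
            = (PySem.Dict.insert ⟨item⟩ "level" "H1").items :: fixB_go (max 0 1) rest := by
          simp only [fixB_go, hmin]
          rw [show ("H" ++ PySem.Int.toStr (1 : Int)) = "H1" from by decide]
        rw [hstep, hB, ih _ _ (max 0 1) hrest ?_ ?_ ?_ ?_ ?_]
        · simp
        · simp; omega
        · simp; omega
        · simp [PySem.Dict.getD_insert]; omega
        · simp [PySem.Dict.getD_insert]; omega
        · omega
      · by_cases hb : counts.getD "H2" 0 = 0
        · have hest1 : est = 1 := by have := h1.not.mp (by simpa using ha); have := h2.mp hb; omega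
          subst hest1
          have hstep : fixA_step (acc, counts) item
              = (acc ++ [(PySem.Dict.insert ⟨item⟩ "level" "H2").items],
                 counts.insert "H2" (counts.getD "H2" 0 + 1)) := by
            simp [fixA_step, hg, ha, hb]
          have hmin : min ((PySem.Dict.ofList [("H1", (1 : Int)), ("H2", 2), ("H3", 3)]).getD
              ((PySem.Dict.mk item).getD "level" "") 0) ((1 : Int) + 1) = 2 := by
            rw [hg, show (PySem.Dict.ofList [("H1", (1 : Int)), ("H2", 2), ("H3", 3)]).getD "H3" 0 = 3 from by decide]; omega
          have hB : fixB_go 1 (item :: rest)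
              = (PySem.Dict.insert ⟨item⟩ "level" "H2").items :: fixB_go (max 1 2) rest := by
            simp only [fixB_go, hmin]
            rw [show ("H" ++ PySem.Int.toStr (2 : Int)) = "H2" from by decide]
          rw [hstep, hB, ih _ _ (max 1 2) hrest ?_ ?_ ?_ ?_ ?_]
          · simp
          · simp [PySem.Dict.getD_insert]; omega
          · simp [PySem.Dict.getD_insert]; omega
          · simp; omega
          · simp; omega
          · omega
        · have hstep : fixA_step (acc, counts) item
              = (acc ++ [item], counts.insert "H3" (counts.getD "H3" 0 + 1)) := by
            simp [fixA_step, hg, ha, hb]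
          have hmin : min ((PySem.Dict.ofList [("H1", (1 : Int)), ("H2", 2), ("H3", 3)]).getD
              ((PySem.Dict.mk item).getD "level" "") 0) (est + 1) = 3 := by
            rw [hg, show (PySem.Dict.ofList [("H1", (1 : Int)), ("H2", 2), ("H3", 3)]).getD "H3" 0 = 3 from by decide]
            omega
          have hB : fixB_go est (item :: rest) = item :: fixB_go (max est 3) rest := by
            simp only [fixB_go, hmin]
            rw [show ("H" ++ PySem.Int.toStr (3 : Int)) = "H3" from by decide, hself]
          rw [hstep, hB, ih _ _ (max est 3) hrest ?_ ?_ ?_ ?_ ?_]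
          · simp
          · simp [PySem.Dict.getD_insert]; omega
          · simp [PySem.Dict.getD_insert]; omega
          · simp [PySem.Dict.getD_insert]; omega
          · simp [PySem.Dict.getD_insert]; omega
          · omega

-- ===== VERDICT (by name: the statement is the Claim_ definition above) =====
theorem fix_hierarchy_spec : Claim_equal_fix_hierarchy := by
  intro outline _ hpre
  unfold Spec_fix_hierarchy fix_hierarchy fix_hierarchy_alt
  by_cases h : outline = []
  · simp [h]
  · simp only [if_neg h]
    have := go_eq outline [] (PySem.Dict.ofList [("H1", 0), ("H2", 0), ("H3", 0)]) 0
      (fun it hm => hpre it hm) (by decide) (by decide) (by decide) (by decide) (by decide)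
    simpa using this
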